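-- pv_equiv track=rewrite | github.com/saadati944/simple-tse-crawler | tse crawler.py | get_printable_table
-- ===== SOURCE A (Python) =====
-- def fixlen(a,l):
--         if len(a)<l:
--             a+=' '*(l-len(a))
--         elif len(a)>l:
--             a=a[:-len(a)+l]
--         return a
--
-- def get_printable_table(table):
--     out =' ___________________________________________________________________________\n'
--     out+='/             sell                    |              buy                    \\\n'
--     out+='|count       -volume      -cost       |cost        -volume      -count      |\n'
--     for i in range(len(table)):
--         if i%6==0 and i!=0:
--            out+='|\n|'
--         elif i%3==0:
--             out+='|'
--         else :
--             out+='  '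
--         out+= fixlen(table[i],11)
--     return out+'|'
-- ===== SOURCE B (Python) =====
-- def fixlen(a,l):
--         if len(a)<l:
--             a+=' '*(l-len(a))
--         elif len(a)>l:
--             a=a[:-len(a)+l]
--         return a
--
-- def get_printable_table(table):
--     out =' ___________________________________________________________________________\n'
--     out+='/             sell                    |              buy                    \\\n'
--     out+='|count       -volume      -cost       |cost        -volume      -count      |\n'
--     rows = []
--     i = 0
--     while i < len(table):
--         rows.append(table[i:i+6])
--         i += 6
--     for r, row in enumerate(rows):
--         for j, cell in enumerate(row):
--             if j == 0:
--                 out += '|' if r == 0 else '|\n|'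
--             elif j == 3:
--                 out += '|'
--             else:
--                 out += '  '
--             out += fixlen(cell, 11)
--     return out + '|'
-- ===== Notes on version B (the rewrite author's own statement) =====
-- stated objective: alternative
-- what changed: A walks the flat cell list once with a global index and decides each separator by i%6/i%3 modular tests; B first chunks the table into rows of six and then uses two nested loops, choosing each prefix from the within-row position (j==0 first-row vs later-row, j==3 mid-row) with no modular arithmetic.
import Mathlib
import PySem

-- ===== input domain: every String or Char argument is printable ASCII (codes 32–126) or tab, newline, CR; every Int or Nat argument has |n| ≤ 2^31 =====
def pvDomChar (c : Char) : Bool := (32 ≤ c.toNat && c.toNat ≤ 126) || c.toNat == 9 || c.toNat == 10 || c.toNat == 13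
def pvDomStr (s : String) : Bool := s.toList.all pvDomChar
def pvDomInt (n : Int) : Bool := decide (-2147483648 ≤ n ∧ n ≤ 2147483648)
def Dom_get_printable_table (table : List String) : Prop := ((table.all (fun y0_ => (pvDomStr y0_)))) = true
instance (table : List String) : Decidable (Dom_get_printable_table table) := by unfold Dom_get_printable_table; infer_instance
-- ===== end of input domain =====

-- B replaces A's flat scan with i%6/i%3 separator tests by rows-of-six chunking and two
-- nested loops keyed on the within-row position; same output, alternative decomposition.

-- ===== PORT A =====
-- shared helper: Python fixlen (identical in Source A and Source B);
-- ' '*(l-len(a)) is String.mk (pyRepeat [' '] (l-len a)) — exact: repetition of a singleton char list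
def fixlen (a : String) (l : Int) : String :=
  if PySem.Str.len a < l then a ++ String.ofList (PySem.List.pyRepeat [' '] (l - PySem.Str.len a))
  else if PySem.Str.len a > l then PySem.Str.slice a none (some (-(PySem.Str.len a) + l))
  else a

def get_printable_table (table : List String) : String :=
  let out := " ___________________________________________________________________________\n"
  let out := out ++ "/             sell                    |              buy                    \\\n"
  let out := out ++ "|count       -volume      -cost       |cost        -volume      -count      |\n"
  let out := (PySem.List.pyRange 0 (PySem.List.len table) 1).foldl
    (fun out i =>
      let out :=
        if PySem.Int.mod i 6 == 0 && i != 0 then out ++ "|\n|"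
        else if PySem.Int.mod i 3 == 0 then out ++ "|"
        else out ++ "  "
      out ++ fixlen (PySem.List.pyGetD table i "") 11)
    out
  out ++ "|"

-- ===== PORT B =====
-- Source B's index-stepping while loop building rows of six (table[i:i+6], i += 6),
-- as the obvious structural recursion on the remaining length
def chunks6 (table : List String) (i : Nat) : List (List String) :=
  if i < table.length then
    PySem.List.slice table (some (i : Int)) (some ((i + 6 : Nat) : Int)) :: chunks6 table (i + 6)
  else []
termination_by table.length - i
decreasing_by omega

def get_printable_table_alt (table : List String) : String :=
  let out := " ___________________________________________________________________________\n"
  let out := out ++ "/             sell                    |              buy                    \\\n"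
  let out := out ++ "|count       -volume      -cost       |cost        -volume      -count      |\n"
  let rows := chunks6 table 0
  let out := (PySem.List.enumerate rows 0).foldl
    (fun out rp =>
      (PySem.List.enumerate rp.2 0).foldl
        (fun out cp =>
          let out :=
            if cp.1 == 0 then (if rp.1 == 0 then out ++ "|" else out ++ "|\n|")
            else if cp.1 == 3 then out ++ "|"
            else out ++ "  "
          out ++ fixlen cp.2 11)
        out)
    out
  out ++ "|"

-- ===== PRECONDITION & SPEC =====
def Spec_get_printable_table (table : List String) (out : String) : Prop := out = get_printable_table_alt table
instance (table : List String) (out : String) : Decidable (Spec_get_printable_table table out) := by unfold Spec_get_printable_table; infer_instance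

-- ===== CLAIM (what is proved, stated in full; the proofs are below) =====
def Claim_equal_get_printable_table : Prop := ∀ (table : List String), Dom_get_printable_table table → Spec_get_printable_table table (get_printable_table table)

-- ===== LEMMAS AND PROOFS =====

-- proof-side restatement of the chunking as take/drop recursion
def chunksRec (xs : List String) : List (List String) :=
  if _h : xs = [] then [] else xs.take 6 :: chunksRec (xs.drop 6)
termination_by xs.length
decreasing_by
  simp only [List.length_drop]
  have : 0 < xs.length := List.length_pos_iff.mpr _h
  omega

theorem chunks6_eq : ∀ (n : Nat) (table : List String) (i : Nat), table.length - i ≤ n →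
    chunks6 table i = chunksRec (table.drop i) := by
  intro n
  induction n with
  | zero =>
      intro table i hi
      have hge : table.length ≤ i := by omega
      rw [chunks6, if_neg (by omega), List.drop_eq_nil_of_le hge, chunksRec, dif_pos rfl]
  | succ n ih =>
      intro table i hi
      by_cases hlt : i < table.length
      · rw [chunks6, if_pos hlt, chunksRec,
          dif_neg (by simp [List.drop_eq_nil_iff]; omega)]
        congr 1
        · rw [PySem.List.slice_natCast]
          congr 1
          omega
        · rw [ih table (i + 6) (by omega), List.drop_drop]
      · rw [chunks6, if_neg hlt, List.drop_eq_nil_of_le (by omega), chunksRec, dif_pos rfl]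

-- A's loop step / B's inner loop step, named for the proofs
def astep (out : String) (p : Int × String) : String :=
  (if PySem.Int.mod p.1 6 == 0 && p.1 != 0 then out ++ "|\n|"
   else if PySem.Int.mod p.1 3 == 0 then out ++ "|"
   else out ++ "  ") ++ fixlen p.2 11

def bstep (r : Int) (out : String) (p : Int × String) : String :=
  (if p.1 == 0 then (if r == 0 then out ++ "|" else out ++ "|\n|")
   else if p.1 == 3 then out ++ "|"
   else out ++ "  ") ++ fixlen p.2 11

theorem step_eq (r j : Int) (hr : 0 ≤ r) (hj0 : 0 ≤ j) (hj : j < 6) (acc : String) (x : String) :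
    astep acc (6 * r + j, x) = bstep r acc (j, x) := by
  unfold astep bstep
  rw [PySem.Int.mod_eq_emod_of_pos (a := 6 * r + j) (by norm_num),
      PySem.Int.mod_eq_emod_of_pos (a := 6 * r + j) (by norm_num)]
  split_ifs <;> first
    | rfl
    | (exfalso; simp only [Bool.and_eq_true, beq_iff_eq, bne_iff_ne, ne_eq] at *; omega)

theorem row_eq (row : List String) (r : Int) (hr : 0 ≤ r) :
    ∀ (j : Int), 0 ≤ j → j + row.length ≤ 6 → ∀ (acc : String),
      (PySem.List.enumerate row (6 * r + j)).foldl astep acc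
        = (PySem.List.enumerate row j).foldl (bstep r) acc := by
  induction row with
  | nil => intro j _ _ acc; simp [PySem.List.enumerate_nil]
  | cons x t ih =>
      intro j hj0 hj6 acc
      rw [PySem.List.enumerate_cons, PySem.List.enumerate_cons, List.foldl_cons, List.foldl_cons]
      rw [step_eq r j hr hj0 (by simp at hj6; omega) acc x]
      have := ih (j + 1) (by omega) (by simp at hj6 ⊢; omega) (bstep r acc (j, x))
      rw [show 6 * r + j + 1 = 6 * r + (j + 1) by ring]
      exact this

theorem main_eq : ∀ (n : Nat) (xs : List String), xs.length ≤ n → ∀ (r : Int), 0 ≤ r → ∀ (acc : String),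
    (PySem.List.enumerate xs (6 * r)).foldl astep acc
      = (PySem.List.enumerate (chunksRec xs) r).foldl
          (fun out rp => (PySem.List.enumerate rp.2 0).foldl (bstep rp.1) out) acc := by
  intro n
  induction n with
  | zero =>
      intro xs hx r hr acc
      have : xs = [] := List.length_eq_zero_iff.mp (Nat.le_zero.mp hx)
      subst this
      rw [chunksRec]
      simp [PySem.List.enumerate_nil]
  | succ n ih =>
      intro xs hx r hr acc
      by_cases hnil : xs = []
      · subst hnil; rw [chunksRec]; simp [PySem.List.enumerate_nil]
      · rw [chunksRec, dif_neg hnil]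
        rw [PySem.List.enumerate_cons, List.foldl_cons]
        have hsplit : PySem.List.enumerate xs (6 * r)
            = PySem.List.enumerate (xs.take 6) (6 * r)
              ++ PySem.List.enumerate (xs.drop 6) (6 * r + (xs.take 6).length) := by
          conv_lhs => rw [← List.take_append_drop 6 xs]
          rw [PySem.List.enumerate_append]
        rw [hsplit, List.foldl_append]
        have hrow : (PySem.List.enumerate (xs.take 6) (6 * r)).foldl astep acc
            = (PySem.List.enumerate (xs.take 6) 0).foldl (bstep r) acc := by
          have := row_eq (xs.take 6) r hr 0 (by omega)
            (by have := List.length_take_le 6 xs; omega) acc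
          simpa using this
        rw [hrow]
        by_cases hle : xs.length ≤ 6
        · have hdrop : xs.drop 6 = [] := by
            rw [List.drop_eq_nil_iff]; omega
          rw [hdrop, chunksRec]
          simp [PySem.List.enumerate_nil]
        · have htl : ((xs.take 6).length : Int) = 6 := by
            simp [List.length_take]; omega
          rw [htl, show 6 * r + (6 : Int) = 6 * (r + 1) by ring]
          have := ih (xs.drop 6) (by simp [List.length_drop]; omega) (r + 1) (by omega)
            ((PySem.List.enumerate (xs.take 6) 0).foldl (bstep r) acc)
          exact this

-- ===== VERDICT (by name: the statement is the Claim_ definition above) =====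
theorem get_printable_table_spec : Claim_equal_get_printable_table := by
  unfold Claim_equal_get_printable_table Spec_get_printable_table
  intro table _
  have h1 : ∀ (init : String),
      (PySem.List.pyRange 0 (PySem.List.len table) 1).foldl
        (fun out i => astep out (i, PySem.List.pyGetD table i "")) init
        = (PySem.List.enumerate (chunksRec table) 0).foldl
            (fun out rp => (PySem.List.enumerate rp.2 0).foldl (bstep rp.1) out) init := by
    intro init
    calc (PySem.List.pyRange 0 (PySem.List.len table) 1).foldl
          (fun out i => astep out (i, PySem.List.pyGetD table i "")) init
        = (PySem.List.enumerate table 0).foldl astep init := by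
          rw [PySem.List.enumerate_eq_map_pyRange (d := ""), List.foldl_map]
      _ = _ := by
          have := main_eq table.length table le_rfl 0 le_rfl init
          simpa using this
  have hch : chunks6 table 0 = chunksRec table := by
    rw [chunks6_eq table.length table 0 (by omega)]; rfl
  rw [← hch] at h1
  exact congrArg (fun s => s ++ "|")
    (h1 (" ___________________________________________________________________________\n"
      ++ "/             sell                    |              buy                    \\\n"
      ++ "|count       -volume      -cost       |cost        -volume      -count      |\n"))
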